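-- pv_equiv track=rewrite | github.com/ahsan-007/Competitive-Programming | Daily Streak/Medium/CountSubmatricesWithTopLeftElementAndSumLessThanK.py | countSubmatrices
-- ===== SOURCE A (Python) =====
-- from typing import List
--
-- def countSubmatrices(grid: List[List[int]], k: int) -> int:
--     count = 0
--     for i in range(len(grid)):
--         for j in range(len(grid[i])):
--             if i != 0 or j != 0:
--                 if i == 0 or j == 0:
--                     if i == 0:
--                         grid[i][j] = grid[i][j] + grid[i][j-1]
--                     else:
--                         grid[i][j] = grid[i][j] + grid[i-1][j]
--                 else:
--                     grid[i][j] = grid[i-1][j] + grid[i][j-1] + \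
--                         grid[i][j] - grid[i-1][j-1]
--
--             if grid[i][j] <= k:
--                 count += 1
--     return count
-- ===== SOURCE B (Python) =====
-- from typing import List
--
-- def countSubmatrices(grid: List[List[int]], k: int) -> int:
--     # Pass 1: row-wise running sums (in place).
--     for row in grid:
--         acc = 0
--         for j in range(len(row)):
--             acc += row[j]
--             row[j] = acc
--     # Pass 2: column-wise accumulation (in place), finishing the 2D prefix sums.
--     for i in range(1, len(grid)):
--         prev = grid[i - 1]
--         row = grid[i]
--         for j in range(len(row)):
--             row[j] += prev[j]
--     # Pass 3: count entries <= k.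
--     count = 0
--     for row in grid:
--         for v in row:
--             if v <= k:
--                 count += 1
--     return count
-- ===== Notes on version B (the rewrite author's own statement) =====
-- stated objective: simpler
-- what changed: A's single nested loop with a four-way branch (inclusion-exclusion prefix-sum update fused with counting) is split into three plain passes: row-wise running sums, column-wise accumulation, then a separate counting sweep; no branch logic remains.
import Mathlib
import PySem

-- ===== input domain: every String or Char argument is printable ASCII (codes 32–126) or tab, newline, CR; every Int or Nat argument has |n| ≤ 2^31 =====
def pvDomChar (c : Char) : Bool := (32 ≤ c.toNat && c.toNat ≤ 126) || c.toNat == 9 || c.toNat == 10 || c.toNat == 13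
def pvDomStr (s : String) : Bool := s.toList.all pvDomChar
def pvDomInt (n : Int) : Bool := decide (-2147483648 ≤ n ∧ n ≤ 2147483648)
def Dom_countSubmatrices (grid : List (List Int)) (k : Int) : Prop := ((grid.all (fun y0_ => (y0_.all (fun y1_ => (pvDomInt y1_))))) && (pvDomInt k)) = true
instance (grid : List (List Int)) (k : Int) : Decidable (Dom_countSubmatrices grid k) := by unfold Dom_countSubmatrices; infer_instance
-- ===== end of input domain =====

-- B replaces A's fused four-way-branch inclusion-exclusion loop by three plain passes
-- (row sums, column sums, count); same return value and same final mutated grid.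
-- The equivalence proved here is about the return value; both Pythons mutate `grid`
-- in place to the identical final prefix-sum state.

-- ===== PORT A =====
-- Python list reads/writes grid[i][j] with in-range indices on Pre_; getD/set are exact there.
def pvGetA (g : List (List Int)) (i j : Nat) : Int := (g.getD i []).getD j 0

def pvSetA (g : List (List Int)) (i j : Nat) (v : Int) : List (List Int) :=
  g.set i ((g.getD i []).set j v)

def stepA (k : Int) (i : Nat) (st : List (List Int) × Int) (j : Nat) : List (List Int) × Int :=
  let g := st.1
  let g' :=
    if i = 0 ∧ j = 0 then g
    else if i = 0 then pvSetA g i j (pvGetA g i j + pvGetA g i (j - 1))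
    else if j = 0 then pvSetA g i j (pvGetA g i j + pvGetA g (i - 1) j)
    else pvSetA g i j (pvGetA g (i - 1) j + pvGetA g i (j - 1) + pvGetA g i j - pvGetA g (i - 1) (j - 1))
  (g', if pvGetA g' i j ≤ k then st.2 + 1 else st.2)

def countSubmatrices (grid : List (List Int)) (k : Int) : Int :=
  ((List.range grid.length).foldl
    (fun st i => (List.range (st.1.getD i []).length).foldl (stepA k i) st)
    (grid, 0)).2

-- ===== PORT B =====
-- pass 1 inner loop: running sum written back over the row
def prefixRow (acc : Int) : List Int → List Int
  | [] => []
  | x :: xs => (acc + x) :: prefixRow (acc + x) xs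

-- pass 2: each row gets the (already accumulated) previous row added pointwise;
-- zipWith is exact on Pre_ (row never longer than the previous row; Python raises otherwise)
def colPass (prev : List Int) : List (List Int) → List (List Int)
  | [] => []
  | r :: rs =>
      let r' := List.zipWith (fun p x => x + p) prev r
      r' :: colPass r' rs

def countSubmatrices_alt (grid : List (List Int)) (k : Int) : Int :=
  let g1 := grid.map (prefixRow 0)
  let g2 := match g1 with
            | [] => []
            | r :: rs => r :: colPass r rs
  g2.foldl (fun c row => row.foldl (fun c v => if v ≤ k then c + 1 else c) c) 0

-- ===== PRECONDITION & SPEC =====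
-- Pre_ excludes exactly the inputs where A raises IndexError: a row longer than the
-- row above it makes A read grid[i-1][j] out of range (B raises there too).
def Pre_countSubmatrices (grid : List (List Int)) (k : Int) : Prop :=
  List.IsChain (fun a b => b.length ≤ a.length) grid

instance (grid : List (List Int)) (k : Int) : Decidable (Pre_countSubmatrices grid k) := by
  unfold Pre_countSubmatrices; infer_instance

def pvWitness_countSubmatrices : List (List Int) × Int := ([[1, 2, 3], [4, 5], [6]], 7)

def Spec_countSubmatrices (grid : List (List Int)) (k : Int) (out : Int) : Prop := out = countSubmatrices_alt grid k
instance (grid : List (List Int)) (k : Int) (out : Int) : Decidable (Spec_countSubmatrices grid k out) := by unfold Spec_countSubmatrices; infer_instance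

-- ===== CLAIM (what is proved, stated in full; the proofs are below) =====
def Claim_equal_countSubmatrices : Prop := ∀ (grid : List (List Int)) (k : Int), Dom_countSubmatrices grid k → Pre_countSubmatrices grid k → Spec_countSubmatrices grid k (countSubmatrices grid k)

-- ===== LEMMAS AND PROOFS =====

-- number of entries ≤ k in a row
def countLE (k : Int) : List Int → Int
  | [] => 0
  | x :: xs => (if x ≤ k then 1 else 0) + countLE k xs

def countLE2 (k : Int) (g : List (List Int)) : Int := (g.map (countLE k)).sum

lemma foldl_countLE (k : Int) : ∀ (l : List Int) (c : Int),
    l.foldl (fun c v => if v ≤ k then c + 1 else c) c = c + countLE k l := by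
  intro l; induction l with
  | nil => simp [countLE]
  | cons x xs ih => intro c; rw [List.foldl_cons, ih]; simp only [countLE]; split_ifs <;> omega

lemma foldl_countLE2 (k : Int) : ∀ (g : List (List Int)) (c : Int),
    g.foldl (fun c row => row.foldl (fun c v => if v ≤ k then c + 1 else c) c) c
      = c + countLE2 k g := by
  intro g; induction g with
  | nil => simp [countLE2]
  | cons r rs ih =>
      intro c
      rw [List.foldl_cons, foldl_countLE, ih]
      simp only [countLE2, List.map_cons, List.sum_cons]; ring

lemma getD_mid {α : Type} (d : α) : ∀ (front : List α) (x : α) (l : List α),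
    (front ++ x :: l).getD front.length d = x := by
  intro front; induction front with
  | nil => simp
  | cons a t ih => intro x l; simpa using ih x l

lemma set_mid {α : Type} : ∀ (front : List α) (x y : α) (l : List α),
    (front ++ x :: l).set front.length y = front ++ y :: l := by
  intro front; induction front with
  | nil => simp
  | cons a t ih => intro x y l; simp [ih]

lemma getD_last : ∀ (rdone : List Int) (lastv : Int) (l : List Int),
    rdone.getLast? = some lastv → (rdone ++ l).getD (rdone.length - 1) 0 = lastv := by
  intro rdone; induction rdone with
  | nil => intro _ _ h; simp at h
  | cons a t ih =>
      intro lastv l h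
      cases t with
      | nil => simp_all
      | cons b u =>
          have := ih lastv l (by simpa [List.getLast?] using h)
          simpa [List.length_cons] using this

lemma getD_mid2 {α : Type} (d : α) (front : List α) (p x : α) (l : List α) :
    (front ++ p :: x :: l).getD (front.length + 1) d = x := by
  have h : front ++ p :: x :: l = (front ++ [p]) ++ x :: l := by simp
  rw [h, show front.length + 1 = (front ++ [p]).length by simp]
  exact getD_mid d _ x l

lemma set_mid2 {α : Type} (front : List α) (p x y : α) (l : List α) :
    (front ++ p :: x :: l).set (front.length + 1) y = front ++ p :: y :: l := by
  have h : front ++ p :: x :: l = (front ++ [p]) ++ x :: l := by simp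
  rw [h, show front.length + 1 = (front ++ [p]).length by simp, set_mid]
  simp

-- the four shapes of one iteration of A's inner loop
lemma stepA_00 (k x c : Int) (xs : List Int) (rest : List (List Int)) :
    stepA k 0 ((x :: xs) :: rest, c) 0 = ((x :: xs) :: rest, if x ≤ k then c + 1 else c) := by
  simp [stepA, pvGetA, pvSetA, List.getD_eq_getElem?_getD]

lemma stepA_0j (k x lastv c : Int) (xs : List Int) (rdone : List Int) (rest : List (List Int))
    (hj : ¬ rdone.length = 0) (hlast : rdone.getLast? = some lastv) :
    stepA k 0 ((rdone ++ x :: xs) :: rest, c) rdone.length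
      = ((rdone ++ (x + lastv) :: xs) :: rest, if x + lastv ≤ k then c + 1 else c) := by
  have h1 : (rdone ++ x :: xs).getD rdone.length 0 = x := getD_mid 0 rdone x xs
  have h2 : (rdone ++ x :: xs).getD (rdone.length - 1) 0 = lastv := getD_last rdone lastv _ hlast
  have h3 : (rdone ++ x :: xs).set rdone.length (x + lastv) = rdone ++ (x + lastv) :: xs :=
    set_mid rdone x (x + lastv) xs
  simp only [List.getD_eq_getElem?_getD] at h1 h2 h3
  simp [stepA, pvGetA, pvSetA, hj, h2, h3, List.getD_eq_getElem?_getD]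

lemma stepA_i0 (k x c : Int) (xs prev : List Int) (front rest : List (List Int)) :
    stepA k (front.length + 1) ((front ++ prev :: (x :: xs) :: rest), c) 0
      = (front ++ prev :: ((x + prev.getD 0 0) :: xs) :: rest,
         if x + prev.getD 0 0 ≤ k then c + 1 else c) := by
  have h4 : (front ++ prev :: (x :: xs) :: rest).getD (front.length + 1) [] = x :: xs :=
    getD_mid2 [] front prev _ rest
  have h5 : (front ++ prev :: (x :: xs) :: rest).getD (front.length + 1 - 1) [] = prev := by
    simpa using getD_mid [] front prev ((x :: xs) :: rest)
  have h6 : (front ++ prev :: (x :: xs) :: rest).set (front.length + 1) ((x + prev.getD 0 0) :: xs)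
      = front ++ prev :: ((x + prev.getD 0 0) :: xs) :: rest := set_mid2 front prev _ _ rest
  have h7 : (front ++ prev :: ((x + prev.getD 0 0) :: xs) :: rest).getD (front.length + 1) []
      = (x + prev.getD 0 0) :: xs := getD_mid2 [] front prev _ rest
  simp only [List.getD_eq_getElem?_getD] at h4 h5 h6 h7
  simp [stepA, pvGetA, pvSetA, h4, h5, h6, h7, List.getD_eq_getElem?_getD]

lemma stepA_ij (k x lastv c : Int) (xs prev : List Int) (rdone : List Int)
    (front rest : List (List Int))
    (hj : ¬ rdone.length = 0) (hlast : rdone.getLast? = some lastv) :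
    stepA k (front.length + 1) ((front ++ prev :: (rdone ++ x :: xs) :: rest), c) rdone.length
      = (front ++ prev ::
           (rdone ++ (prev.getD rdone.length 0 + lastv + x - prev.getD (rdone.length - 1) 0) :: xs) :: rest,
         if (prev.getD rdone.length 0 + lastv + x - prev.getD (rdone.length - 1) 0) ≤ k
         then c + 1 else c) := by
  set v := prev.getD rdone.length 0 + lastv + x - prev.getD (rdone.length - 1) 0 with hv
  have h1 : (rdone ++ x :: xs).getD rdone.length 0 = x := getD_mid 0 rdone x xs
  have h2 : (rdone ++ x :: xs).getD (rdone.length - 1) 0 = lastv := getD_last rdone lastv _ hlast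
  have h3 : (rdone ++ x :: xs).set rdone.length v = rdone ++ v :: xs := set_mid rdone x v xs
  have h4 : (front ++ prev :: (rdone ++ x :: xs) :: rest).getD (front.length + 1) [] = rdone ++ x :: xs :=
    getD_mid2 [] front prev _ rest
  have h5 : (front ++ prev :: (rdone ++ x :: xs) :: rest).getD (front.length + 1 - 1) [] = prev := by
    simpa using getD_mid [] front prev ((rdone ++ x :: xs) :: rest)
  have h6 : (front ++ prev :: (rdone ++ x :: xs) :: rest).set (front.length + 1) (rdone ++ v :: xs)
      = front ++ prev :: (rdone ++ v :: xs) :: rest := set_mid2 front prev _ _ rest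
  have h7 : (rdone ++ v :: xs).getD rdone.length 0 = v := getD_mid 0 rdone v xs
  simp only [List.getD_eq_getElem?_getD] at h1 h2 h3 h4 h5 h6 h7
  simp [stepA, pvGetA, pvSetA, hj, h2, h3, h4, h5, h6, h7, List.getD_eq_getElem?_getD, hv]

-- values A writes into row i (i ≥ 1), processing todo from column j, lastv = value at column j-1
def rowASim (prev : List Int) : Nat → List Int → Int → List Int
  | _, [], _ => []
  | j, x :: xs, lastv =>
      let v := if j = 0 then x + prev.getD 0 0
               else prev.getD j 0 + lastv + x - prev.getD (j - 1) 0
      v :: rowASim prev (j + 1) xs v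

-- values A writes into row 0
def row0Sim : Nat → List Int → Int → List Int
  | _, [], _ => []
  | j, x :: xs, lastv =>
      let v := if j = 0 then x else x + lastv
      v :: row0Sim (j + 1) xs v

-- simulation of A's inner loop on row 0
lemma simRow0 (k : Int) : ∀ (todo rdone : List Int) (rest : List (List Int)) (c lastv : Int),
    (rdone = [] ∨ rdone.getLast? = some lastv) →
    List.foldl (stepA k 0) ((rdone ++ todo) :: rest, c) (List.range' rdone.length todo.length)
      = ((rdone ++ row0Sim rdone.length todo lastv) :: rest,
         c + countLE k (row0Sim rdone.length todo lastv)) := by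
  intro todo; induction todo with
  | nil => intro rdone rest c lastv _; simp [row0Sim, countLE]
  | cons x xs ih =>
      intro rdone rest c lastv h
      rw [List.length_cons, List.range'_succ, List.foldl_cons]
      by_cases hj : rdone.length = 0
      · have hr : rdone = [] := List.eq_nil_of_length_eq_zero hj
        subst hr
        simp only [List.nil_append, List.length_nil]
        rw [stepA_00]
        have := ih [x] rest (if x ≤ k then c + 1 else c) x (Or.inr rfl)
        simp only [List.cons_append, List.nil_append, List.length_cons, List.length_nil,
          Nat.zero_add] at this
        rw [this]
        simp only [row0Sim, Nat.zero_add, Prod.mk.injEq]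
        refine ⟨by trivial, ?_⟩
        simp only [countLE, Nat.zero_add]; split_ifs <;> omega
      · have hlast : rdone.getLast? = some lastv := by
          rcases h with h | h
          · exact absurd (by simp [h]) hj
          · exact h
        rw [stepA_0j k x lastv c xs rdone rest hj hlast]
        have := ih (rdone ++ [x + lastv]) rest (if x + lastv ≤ k then c + 1 else c) (x + lastv)
          (Or.inr (by simp))
        simp only [List.append_assoc, List.cons_append, List.nil_append, List.length_append,
          List.length_cons, List.length_nil, Nat.zero_add] at this
        rw [this]
        simp only [row0Sim, if_neg hj, Prod.mk.injEq]
        refine ⟨by trivial, ?_⟩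
        simp only [countLE]; split_ifs <;> omega

-- simulation of A's inner loop on row i = front.length + 1 ≥ 1
lemma simRow1 (k : Int) (front : List (List Int)) (prev : List Int) :
    ∀ (todo rdone : List Int) (rest : List (List Int)) (c lastv : Int),
    (rdone = [] ∨ rdone.getLast? = some lastv) →
    List.foldl (stepA k (front.length + 1))
        ((front ++ prev :: (rdone ++ todo) :: rest, c)) (List.range' rdone.length todo.length)
      = (front ++ prev :: (rdone ++ rowASim prev rdone.length todo lastv) :: rest,
         c + countLE k (rowASim prev rdone.length todo lastv)) := by
  intro todo; induction todo with
  | nil => intro rdone rest c lastv _; simp [rowASim, countLE]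
  | cons x xs ih =>
      intro rdone rest c lastv h
      rw [List.length_cons, List.range'_succ, List.foldl_cons]
      by_cases hj : rdone.length = 0
      · have hr : rdone = [] := List.eq_nil_of_length_eq_zero hj
        subst hr
        simp only [List.nil_append, List.length_nil]
        rw [stepA_i0]
        have := ih [x + prev.getD 0 0] rest (if x + prev.getD 0 0 ≤ k then c + 1 else c)
          (x + prev.getD 0 0) (Or.inr rfl)
        simp only [List.cons_append, List.nil_append, List.length_cons, List.length_nil,
          Nat.zero_add] at this
        rw [this]
        simp only [rowASim, Nat.zero_add, Prod.mk.injEq]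
        refine ⟨by trivial, ?_⟩
        simp only [countLE, Nat.zero_add]; split_ifs <;> omega
      · have hlast : rdone.getLast? = some lastv := by
          rcases h with h | h
          · exact absurd (by simp [h]) hj
          · exact h
        rw [stepA_ij k x lastv c xs prev rdone front rest hj hlast]
        set v := prev.getD rdone.length 0 + lastv + x - prev.getD (rdone.length - 1) 0 with hv
        have := ih (rdone ++ [v]) rest (if v ≤ k then c + 1 else c) v (Or.inr (by simp))
        simp only [List.append_assoc, List.cons_append, List.nil_append, List.length_append,
          List.length_cons, List.length_nil, Nat.zero_add] at this
        rw [this]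
        simp only [rowASim, if_neg hj, Prod.mk.injEq, ← hv]
        refine ⟨by trivial, ?_⟩
        simp only [countLE]; split_ifs <;> omega

lemma row0Sim_eq : ∀ (todo : List Int) (j : Nat) (lastv s : Int),
    lastv = s → (j = 0 → s = 0) → row0Sim j todo lastv = prefixRow s todo := by
  intro todo; induction todo with
  | nil => intro _ _ _ _ _; rfl
  | cons x xs ih =>
      intro j lastv s h1 h2
      simp only [row0Sim, prefixRow, List.cons.injEq]
      by_cases hj : j = 0
      · rw [if_pos hj]
        have hs : s = 0 := h2 hj
        constructor
        · omega
        · rw [ih (j + 1) x (s + x) (by omega) (by omega)]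
      · rw [if_neg hj]
        constructor
        · omega
        · rw [ih (j + 1) (x + lastv) (s + x) (by omega) (by omega)]

lemma rowASim_eq : ∀ (todo : List Int) (prev : List Int) (j : Nat) (lastv s : Int),
    (j ≠ 0 → lastv = prev.getD (j - 1) 0 + s) → (j = 0 → s = 0) →
    j + todo.length ≤ prev.length →
    rowASim prev j todo lastv = List.zipWith (fun p x => x + p) (prev.drop j) (prefixRow s todo) := by
  intro todo; induction todo with
  | nil => intro prev j lastv s _ _ _; simp [rowASim, prefixRow]
  | cons x xs ih =>
      intro prev j lastv s h1 h2 hlen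
      have hjlt : j < prev.length := by simp only [List.length_cons] at hlen; omega
      have hdrop : prev.drop j = prev[j] :: prev.drop (j + 1) := List.drop_eq_getElem_cons hjlt
      have hgj : prev.getD j 0 = prev[j] := List.getD_eq_getElem prev 0 hjlt
      simp only [rowASim, prefixRow, hdrop, List.zipWith, List.cons.injEq]
      by_cases hj : j = 0
      · rw [if_pos hj]
        have hs : s = 0 := h2 hj
        constructor
        · subst hj; rw [hgj] at *; omega
        · rw [ih prev (j + 1) (x + prev.getD 0 0) (s + x)
            (by intro _
                simp only [Nat.add_sub_cancel]
                subst hj; rw [hgj] at *; omega)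
            (by omega) (by simp only [List.length_cons] at hlen; omega)]
      · rw [if_neg hj]
        have hl := h1 hj
        constructor
        · rw [hgj]; omega
        · rw [ih prev (j + 1) (prev.getD j 0 + lastv + x - prev.getD (j - 1) 0) (s + x)
            (by intro _; simp only [Nat.add_sub_cancel]; omega)
            (by omega) (by simp only [List.length_cons] at hlen; omega)]

lemma prefixRow_length : ∀ (l : List Int) (s : Int), (prefixRow s l).length = l.length := by
  intro l; induction l with
  | nil => intro s; rfl
  | cons x xs ih => intro s; simp [prefixRow, ih]

-- the outer loop from row front.length+1 on, prev already finalized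
lemma outerGo (k : Int) : ∀ (rest : List (List Int)) (front : List (List Int)) (prev : List Int) (c : Int),
    List.IsChain (fun a b => b.length ≤ a.length) (prev :: rest) →
    List.foldl (fun st i => (List.range (st.1.getD i []).length).foldl (stepA k i) st)
        (front ++ prev :: rest, c) (List.range' (front.length + 1) rest.length)
      = (front ++ prev :: colPass prev (rest.map (prefixRow 0)),
         c + countLE2 k (colPass prev (rest.map (prefixRow 0)))) := by
  intro rest; induction rest with
  | nil => intro front prev c _; simp [colPass, countLE2]
  | cons r rs ih =>
      intro front prev c hch
      have hle : r.length ≤ prev.length := (List.isChain_cons_cons.mp hch).1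
      have hch' : List.IsChain (fun a b : List Int => b.length ≤ a.length) (r :: rs) :=
        (List.isChain_cons_cons.mp hch).2
      rw [List.length_cons, List.range'_succ, List.foldl_cons]
      have hget : ((front ++ prev :: r :: rs : List (List Int)), c).1.getD (front.length + 1) [] = r :=
        getD_mid2 [] front prev r rs
      rw [hget]
      have hsim := simRow1 k front prev r [] rs c 0 (Or.inl rfl)
      rw [List.range_eq_range']
      simp only [List.length_nil, List.nil_append] at hsim
      have hrow := rowASim_eq r prev 0 0 0 (by intro hcon; exact absurd rfl hcon) (fun _ => rfl)
        (by simpa using hle)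
      rw [List.drop_zero] at hrow
      rw [hrow] at hsim
      rw [hsim]
      set r' := List.zipWith (fun p x => x + p) prev (prefixRow 0 r) with hr'
      have hlen' : r'.length = r.length := by
        rw [hr', List.length_zipWith, prefixRow_length]; omega
      have hch'' : List.IsChain (fun a b : List Int => b.length ≤ a.length) (r' :: rs) := by
        cases rs with
        | nil => simp
        | cons b t =>
            refine List.isChain_cons_cons.mpr ⟨?_, (List.isChain_cons_cons.mp hch').2⟩
            have hb := (List.isChain_cons_cons.mp hch').1
            omega
      have hrec := ih (front ++ [prev]) r' (c + countLE k r') hch''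
      simp only [List.append_assoc, List.cons_append, List.nil_append, List.length_append,
        List.length_cons, List.length_nil, Nat.zero_add] at hrec
      rw [show front.length + 1 + 1 = front.length + (1 + 1) by omega] at hrec
      rw [hrec]
      simp only [List.map_cons, colPass, countLE2, List.sum_cons, Prod.mk.injEq]
      exact ⟨rfl, by ring⟩

-- ===== VERDICT (by name: the statement is the Claim_ definition above) =====
theorem countSubmatrices_spec : Claim_equal_countSubmatrices := by
  intro grid k _ hpre
  unfold Spec_countSubmatrices countSubmatrices countSubmatrices_alt
  cases grid with
  | nil => simp
  | cons r rs =>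
      rw [List.range_eq_range', List.length_cons, List.range'_succ, List.foldl_cons]
      have hget : (((r :: rs : List (List Int)), (0 : Int)).1.getD 0 []) = r := by simp
      rw [hget]
      have hsim := simRow0 k r [] rs 0 0 (Or.inl rfl)
      rw [List.range_eq_range']
      simp only [List.length_nil, List.nil_append] at hsim
      rw [row0Sim_eq r 0 0 0 rfl (fun _ => rfl)] at hsim
      rw [hsim]
      set r0 := prefixRow 0 r with hr0
      have hch : List.IsChain (fun a b : List Int => b.length ≤ a.length) (r0 :: rs) := by
        cases rs with
        | nil => simp
        | cons b t =>
            refine List.isChain_cons_cons.mpr ⟨?_, (List.isChain_cons_cons.mp hpre).2⟩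
            have hb : b.length ≤ r.length := (List.isChain_cons_cons.mp hpre).1
            rw [hr0, prefixRow_length]; omega
      have hrec := outerGo k rs [] r0 (0 + countLE k r0) hch
      simp only [List.length_nil, List.nil_append, Nat.zero_add] at hrec
      rw [hrec]
      simp only [List.map_cons]
      rw [foldl_countLE2]
      simp only [countLE2, hr0, List.map_cons, List.sum_cons]
      ring
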